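-- pv_equiv track=rewrite | github.com/AaryanBansal-dev/OmniWordlistPro | omni.py | expand_pattern
-- ===== SOURCE A (Python) =====
-- CHARSET_LOWERCASE = "abcdefghijklmnopqrstuvwxyz"
--
-- CHARSET_UPPERCASE = "ABCDEFGHIJKLMNOPQRSTUVWXYZ"
--
-- CHARSET_DIGITS = "0123456789"
--
-- CHARSET_SYMBOLS = "!@#$%^&*()-_=+[]{}\\|;:'\",.<>?/`~"
--
-- def expand_pattern(pattern: str, literal_chars: str = None) -> str:
--     """
--     Expand Crunch-style pattern placeholders
--
--     Pattern syntax: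
--     - @ = lowercase letter (a-z)
--     - , = uppercase letter (A-Z)
--     - % = digit (0-9)
--     - ^ = symbol
--
--     Args:
--         pattern: Pattern string with placeholders
--         literal_chars: Characters to treat as literals (don't expand)
--
--     Returns:
--         Expanded charset string
--     """
--     if not pattern:
--         return CHARSET_LOWERCASE
--
--     literal_set = set(literal_chars or "")
--     charset = ""
--
--     for char in pattern:
--         if char in literal_set:
--             charset += char
--         elif char == '@':
--             charset += CHARSET_LOWERCASE
--         elif char == ',':
--             charset += CHARSET_UPPERCASE
--         elif char == '%':
--             charset += CHARSET_DIGITS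
--         elif char == '^':
--             charset += CHARSET_SYMBOLS
--         else:
--             charset += char
--
--     # Remove duplicates while preserving order
--     seen = set()
--     result = ""
--     for char in charset:
--         if char not in seen:
--             seen.add(char)
--             result += char
--
--     return result
-- ===== SOURCE B (Python) =====
-- CHARSET_LOWERCASE = "abcdefghijklmnopqrstuvwxyz"
-- CHARSET_UPPERCASE = "ABCDEFGHIJKLMNOPQRSTUVWXYZ"
-- CHARSET_DIGITS = "0123456789"
-- CHARSET_SYMBOLS = "!@#$%^&*()-_=+[]{}\\|;:'\",.<>?/`~"
--
-- _PLACEHOLDERS = {'@': CHARSET_LOWERCASE, ',': CHARSET_UPPERCASE,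
--                  '%': CHARSET_DIGITS, '^': CHARSET_SYMBOLS}
--
--
-- def _dedup(s: str) -> str:
--     # recursive dedup: keep the head, delete all its later copies, recurse
--     if not s:
--         return ""
--     return s[0] + _dedup(s[1:].replace(s[0], ""))
--
--
-- def expand_pattern(pattern: str, literal_chars: str = None) -> str:
--     if not pattern:
--         return CHARSET_LOWERCASE
--     # translation table: placeholder -> charset, except placeholders listed as literals
--     lits = set(literal_chars or "")
--     table = {ord(k): v for k, v in _PLACEHOLDERS.items() if k not in lits}
--     return _dedup(pattern.translate(table))
-- ===== Notes on version B (the rewrite author's own statement) =====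
-- stated objective: alternative
-- what changed: Replaces A's if-elif expansion loop and seen-set dedup loop with a filtered translation table applied via str.translate (literal precedence encoded by omitting table entries, expansion done in C with no per-char conditional cascade or string concatenation) followed by a recursive dedup that keeps the head and deletes its later copies with str.replace (no seen set, no dedup loop).
import Mathlib
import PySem

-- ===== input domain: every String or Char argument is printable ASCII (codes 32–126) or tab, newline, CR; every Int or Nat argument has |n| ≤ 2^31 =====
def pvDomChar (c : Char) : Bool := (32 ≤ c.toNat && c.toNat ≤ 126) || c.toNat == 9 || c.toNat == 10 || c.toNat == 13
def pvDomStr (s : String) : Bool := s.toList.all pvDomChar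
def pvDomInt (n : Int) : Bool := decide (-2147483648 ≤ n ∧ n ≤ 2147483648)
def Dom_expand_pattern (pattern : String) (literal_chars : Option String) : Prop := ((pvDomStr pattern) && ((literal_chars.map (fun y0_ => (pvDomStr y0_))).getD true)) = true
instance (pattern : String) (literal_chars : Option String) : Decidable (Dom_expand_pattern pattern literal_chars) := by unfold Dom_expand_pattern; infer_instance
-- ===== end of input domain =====

-- B replaces A's if-elif expansion loop and seen-set dedup loop by a filtered translation
-- table applied with str.translate and a recursive replace-based dedup (alternative algorithm).


def CHARSET_LOWERCASE : String := "abcdefghijklmnopqrstuvwxyz"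
def CHARSET_UPPERCASE : String := "ABCDEFGHIJKLMNOPQRSTUVWXYZ"
def CHARSET_DIGITS : String := "0123456789"
def CHARSET_SYMBOLS : String := "!@#$%^&*()-_=+[]{}\\|;:'\",.<>?/`~"

-- ===== PORT A =====
def expand_pattern (pattern : String) (literal_chars : Option String) : String :=
  if pattern.toList = [] then CHARSET_LOWERCASE
  else
    let literal_set : PySem.Set Char := PySem.Set.ofList (literal_chars.getD "").toList
    let charset : List Char := pattern.toList.foldl (fun cs c =>
      if PySem.Set.contains literal_set c then cs ++ [c]
      else if c = '@' then cs ++ CHARSET_LOWERCASE.toList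
      else if c = ',' then cs ++ CHARSET_UPPERCASE.toList
      else if c = '%' then cs ++ CHARSET_DIGITS.toList
      else if c = '^' then cs ++ CHARSET_SYMBOLS.toList
      else cs ++ [c]) []
    -- second pass: dedup preserving order (seen set, result string)
    let r := charset.foldl (fun (st : PySem.Set Char × List Char) c =>
      if PySem.Set.contains st.1 c then st else (PySem.Set.add st.1 c, st.2 ++ [c]))
      (PySem.Set.empty, [])
    String.ofList r.2

-- ===== PORT B =====
-- the dict comprehension {ord(k): v for k, v in _PLACEHOLDERS.items() if k not in lits}
def pvTable (lits : PySem.Set Char) : PySem.Dict Char String :=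
  [('@', CHARSET_LOWERCASE), (',', CHARSET_UPPERCASE),
   ('%', CHARSET_DIGITS), ('^', CHARSET_SYMBOLS)].foldl
    (fun d kv => if PySem.Set.contains lits kv.1 then d else d.insert kv.1 kv.2)
    PySem.Dict.empty

-- s.translate(table): each char is replaced by its table entry, unmapped chars unchanged
-- (exact: the table maps chars to strings, no char maps to None)
def pvTranslate (table : PySem.Dict Char String) (s : List Char) : List Char :=
  s.flatMap (fun c => match table.get? c with
    | some v => v.toList
    | none => [c])

-- recursive dedup: keep the head, delete all its later copies with replace, recurse
-- (s.replace(c, "") on a single char = filter; exact on List Char)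
def pvDedup : List Char → List Char
  | [] => []
  | c :: t => c :: pvDedup (t.filter (fun x => x != c))
termination_by l => l.length
decreasing_by
  simpa using Nat.lt_succ_of_le (List.length_filter_le _ _)

def expand_pattern_alt (pattern : String) (literal_chars : Option String) : String :=
  if pattern.toList = [] then CHARSET_LOWERCASE
  else
    let lits : PySem.Set Char := PySem.Set.ofList (literal_chars.getD "").toList
    String.ofList (pvDedup (pvTranslate (pvTable lits) pattern.toList))

-- ===== PRECONDITION & SPEC =====
def Spec_expand_pattern (pattern : String) (literal_chars : Option String) (out : String) : Prop := out = expand_pattern_alt pattern literal_chars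
instance (pattern : String) (literal_chars : Option String) (out : String) : Decidable (Spec_expand_pattern pattern literal_chars out) := by unfold Spec_expand_pattern; infer_instance

-- ===== CLAIM (what is proved, stated in full; the proofs are below) =====
def Claim_equal_expand_pattern : Prop := ∀ (pattern : String) (literal_chars : Option String), Dom_expand_pattern pattern literal_chars → Spec_expand_pattern pattern literal_chars (expand_pattern pattern literal_chars)

-- ===== LEMMAS AND PROOFS =====

-- A's expansion of one pattern character, as a function of the literal set
def pvExp (ls : PySem.Set Char) (c : Char) : List Char :=
  if PySem.Set.contains ls c then [c]
  else if c = '@' then CHARSET_LOWERCASE.toList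
  else if c = ',' then CHARSET_UPPERCASE.toList
  else if c = '%' then CHARSET_DIGITS.toList
  else if c = '^' then CHARSET_SYMBOLS.toList
  else [c]

-- A's dedup step
def pvStep (st : PySem.Set Char × List Char) (c : Char) : PySem.Set Char × List Char :=
  if PySem.Set.contains st.1 c then st else (PySem.Set.add st.1 c, st.2 ++ [c])

lemma pv_A_charset (ls : PySem.Set Char) (l : List Char) :
    l.foldl (fun cs c =>
      if PySem.Set.contains ls c then cs ++ [c]
      else if c = '@' then cs ++ CHARSET_LOWERCASE.toList
      else if c = ',' then cs ++ CHARSET_UPPERCASE.toList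
      else if c = '%' then cs ++ CHARSET_DIGITS.toList
      else if c = '^' then cs ++ CHARSET_SYMBOLS.toList
      else cs ++ [c]) []
    = l.flatMap (pvExp ls) := by
  have h : (fun (cs : List Char) c =>
      if PySem.Set.contains ls c then cs ++ [c]
      else if c = '@' then cs ++ CHARSET_LOWERCASE.toList
      else if c = ',' then cs ++ CHARSET_UPPERCASE.toList
      else if c = '%' then cs ++ CHARSET_DIGITS.toList
      else if c = '^' then cs ++ CHARSET_SYMBOLS.toList
      else cs ++ [c]) = fun cs c => cs ++ pvExp ls c := by
    funext cs c
    simp only [pvExp]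
    split_ifs <;> rfl
  rw [h, PySem.List.foldl_append_eq_flatMap]
  rfl

-- B's per-char translation equals A's per-char expansion
lemma pv_translate1_eq (ls : PySem.Set Char) (c : Char) :
    (match (pvTable ls).get? c with
      | some v => v.toList
      | none => [c]) = pvExp ls c := by
  simp only [pvTable, List.foldl, pvExp]
  by_cases h1 : c = '@' <;> by_cases h2 : c = ',' <;> by_cases h3 : c = '%' <;>
    by_cases h4 : c = '^' <;>
    split_ifs <;>
    simp_all [PySem.Dict.get?_insert, PySem.Dict.get?_empty]

-- A's seen-set dedup fold computes the recursive replace-based dedup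
lemma pv_foldl_step_snd (l : List Char) (s : PySem.Set Char) (r : List Char) :
    (l.foldl pvStep (s, r)).2
      = r ++ pvDedup (l.filter (fun c => !PySem.Set.contains s c)) := by
  induction l generalizing s r with
  | nil => simp [pvDedup]
  | cons c t ih =>
      rw [List.foldl_cons]
      by_cases hc : PySem.Set.contains s c
      · simp only [pvStep, hc, if_true, List.filter_cons, Bool.not_eq_true']
        simpa using ih s r
      · have hc' : PySem.Set.contains s c = false := by simpa using hc
        have hcmem : c ∉ s := fun h => hc ((PySem.Set.contains_iff s c).2 h)
        have hstep : pvStep (s, r) c = (PySem.Set.add s c, r ++ [c]) := by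
          simp [pvStep, hcmem]
        rw [hstep, ih]
        have hset : ∀ x, (!PySem.Set.contains (PySem.Set.add s c) x)
            = (x != c && !PySem.Set.contains s x) := by
          intro x
          simp [PySem.Set.mem_add, bne, Bool.and_comm, ← Bool.beq_eq_decide_eq]
        have hfil : t.filter (fun x => !PySem.Set.contains (PySem.Set.add s c) x)
            = (t.filter (fun x => !PySem.Set.contains s x)).filter (fun x => x != c) := by
          rw [List.filter_filter]
          exact List.filter_congr (fun x _ => hset x)
        rw [hfil]
        simp [pvDedup, List.filter_filter, hcmem]

-- ===== VERDICT (by name: the statement is the Claim_ definition above) =====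
theorem expand_pattern_spec : Claim_equal_expand_pattern := by
  intro pattern literal_chars _
  unfold Spec_expand_pattern expand_pattern expand_pattern_alt
  by_cases hp : pattern.toList = []
  · simp [hp]
  · simp only [hp, if_false]
    set ls : PySem.Set Char := PySem.Set.ofList (literal_chars.getD "").toList with hls
    have hstep : (fun (st : PySem.Set Char × List Char) c =>
        if PySem.Set.contains st.1 c then st
        else (PySem.Set.add st.1 c, st.2 ++ [c])) = pvStep := rfl
    rw [hstep, pv_A_charset ls, pv_foldl_step_snd]
    have htr : pvTranslate (pvTable ls) pattern.toList = pattern.toList.flatMap (pvExp ls) := by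
      unfold pvTranslate
      exact List.flatMap_congr (fun c _ => pv_translate1_eq ls c)
    have hempty : (pattern.toList.flatMap (pvExp ls)).filter
        (fun c => !PySem.Set.contains PySem.Set.empty c)
        = pattern.toList.flatMap (pvExp ls) := by
      simp [PySem.Set.empty, PySem.Set.contains]
    rw [htr, hempty]
    rfl
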